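-- pv_equiv track=rewrite | github.com/xiangyangyang/algorithm | src/practise16.py | max_income
-- ===== SOURCE A (Python) =====
-- def max_income(T, travel_times, city_incomes):
--     # 从A城到B城，途径N个城市，意味着有N+1个时间间隔。而且时间间隔是必花的时间
--     total_path_day = sum(travel_times)
--     if total_path_day >= T: return 0
--     total_income = 0
--     # 剩下可用来赚钱的时间
--     total_day = T - total_path_day
--     # 排序，首元素肯定收益最高
--     # 另外，歌手可不可以回退，好像跟最大收益没有关系，现在只是计算出策略，并不实际走
--     sort_arr(city_incomes)
--     while total_day > 0:
--         while city_incomes[0][0] >= city_incomes[1][0] and total_day > 0: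
--             total_income += city_incomes[0][0]
--             city_incomes[0][0] -= city_incomes[0][1]
--             total_day -= 1
--         sort_arr(city_incomes)
--
--     return total_income
--
-- def sort_arr(arr: [[]]):
--     # 按收益最大的排序
--     arr.sort(reverse=True)
--     is_income_equal = True
--     for i in range(len(arr)):
--         if arr[0][0] != arr[i][0]:
--             is_income_equal = False
--     if is_income_equal:
--         # 如果收益都相等时按收益递减值的顺序排序
--         arr.sort(key=lambda x: x[1])
-- ===== SOURCE B (Python) =====
-- def max_income(T, travel_times, city_incomes):
--     # Batch greedy: pick the best row (lexicographic max, or min decrement when all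
--     # incomes are equal -- the same row A's sort puts first), then account a whole
--     # run of days from it in closed form (arithmetic series) instead of day by day.
--     # Does not mutate city_incomes (A sorts and decrements it in place).
--     rem = T - sum(travel_times)
--     if rem <= 0:
--         return 0
--     rows = [list(c) for c in city_incomes]
--     total = 0
--     while rem > 0:
--         if all(r[0] == rows[0][0] for r in rows):
--             sel = min(rows, key=lambda r: r[1])
--         else:
--             sel = max(rows)
--         rows.remove(sel)
--         h, d = sel[0], sel[1]
--         s = max(rows)[0]
--         m = rem if d <= 0 else min(rem, (h - s) // d + 1)
--         total += m * h - d * m * (m - 1) // 2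
--         rows.append([h - m * d] + sel[1:])
--         rem -= m
--     return total
-- ===== Notes on version B (the rewrite author's own statement) =====
-- stated objective: alternative
-- what changed: A simulates day by day, decrementing the top row one day at a time and re-sorting the whole list after every run; B never sorts and never iterates over days: once per run it scans for the best row (same tie rule as a round of A's sort), computes the run length against the second-best income, and accounts the whole run with an arithmetic-series closed form.
-- outside the precondition, e.g. on max_income(1, [], [[9, 1], [5]]): A returns 9, B returns 9; on max_income(2, [], [[9, 1], [5], [8, 2]]): A returns 17, B returns 17
import Mathlib
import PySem

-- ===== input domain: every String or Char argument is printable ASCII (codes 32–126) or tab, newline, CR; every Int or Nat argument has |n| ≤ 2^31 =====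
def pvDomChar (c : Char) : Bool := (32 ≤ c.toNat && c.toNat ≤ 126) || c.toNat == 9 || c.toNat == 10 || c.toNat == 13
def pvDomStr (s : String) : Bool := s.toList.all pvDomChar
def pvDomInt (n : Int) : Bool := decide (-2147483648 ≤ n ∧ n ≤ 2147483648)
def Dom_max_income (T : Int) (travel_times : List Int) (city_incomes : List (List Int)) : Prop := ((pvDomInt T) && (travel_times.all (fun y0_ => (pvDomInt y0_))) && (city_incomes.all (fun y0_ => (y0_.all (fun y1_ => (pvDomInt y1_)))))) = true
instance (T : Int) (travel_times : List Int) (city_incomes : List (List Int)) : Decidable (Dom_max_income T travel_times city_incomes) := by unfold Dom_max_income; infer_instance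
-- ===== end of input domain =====

-- B replaces A's day-by-day simulation (which re-sorts the whole list after every
-- run of the top city) by a batch greedy: it selects the best row once per run and
-- accounts the whole run of days in closed form (arithmetic series).  A sorts and
-- decrements city_incomes in place; B does not mutate it — the equivalence proved
-- here is about the return value only.

-- ===== PORT A =====
-- arr[i] / row[i]: Pre_ guarantees ≥ 2 rows, each of length ≥ 2, so every index
-- Python reads is in range and getD is exact there.
def pvRow (arr : List (List Int)) (i : Nat) : List Int := arr.getD i []
def pvElt (r : List Int) (i : Nat) : Int := r.getD i 0

-- sort_arr: arr.sort(reverse=True) is a stable lexicographic descending sort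
-- (Mathlib's order on List Int is exactly Python's lexicographic list comparison);
-- then the all-incomes-equal flag loop, then the conditional stable re-sort by x[1].
def sort_arr (arr : List (List Int)) : List (List Int) :=
  let a1 := PySem.List.sorted arr (fun r => r) true
  let isEq := a1.foldl (fun b r => if pvElt (pvRow a1 0) 0 ≠ pvElt r 0 then false else b) true
  if isEq then PySem.List.sorted a1 (fun r => pvElt r 1) false else a1

-- the inner while loop: while arr[0][0] >= arr[1][0] and total_day > 0
def aInner (arr : List (List Int)) (inc : Int) (day : Int) : List (List Int) × Int × Int :=
  if h : pvElt (pvRow arr 1) 0 ≤ pvElt (pvRow arr 0) 0 ∧ 0 < day then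
    aInner (arr.set 0 ((pvRow arr 0).set 0 (pvElt (pvRow arr 0) 0 - pvElt (pvRow arr 0) 1)))
      (inc + pvElt (pvRow arr 0) 0) (day - 1)
  else (arr, inc, day)
termination_by day.toNat
decreasing_by omega

-- the outer while loop; on Pre_ inputs each iteration consumes at least one day,
-- so fuel = total_day.toNat suffices (a totality device only: the value agrees with
-- Python wherever Python's loop terminates).
def aOuter : Nat → List (List Int) → Int → Int → Int
  | 0, _, inc, _ => inc
  | fuel+1, arr, inc, day =>
    if 0 < day then
      let r := aInner arr inc day
      aOuter fuel (sort_arr r.1) r.2.1 r.2.2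
    else inc

def max_income (T : Int) (travel_times : List Int) (city_incomes : List (List Int)) : Int :=
  let total_path_day := travel_times.sum
  if T ≤ total_path_day then 0
  else aOuter (T - total_path_day).toNat (sort_arr city_incomes) 0 (T - total_path_day)

-- ===== PORT B =====
-- one round per recursive call: select the row A's sort would put first
-- (min(rows, key=lambda r: r[1]) when all incomes are equal, max(rows) — Python's
-- lexicographic list max — otherwise), remove it, and take a whole run of days
-- from it in closed form.  rows[0] / r[0] / r[1] are in range on Pre_ inputs, so
-- headD/getD are exact there; fuel = rem.toNat suffices since a round takes m ≥ 1 days.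
def bLoop : Nat → List (List Int) → Int → Int → Int
  | 0, _, total, _ => total
  | fuel+1, rows, total, rem =>
    if 0 < rem then
      let sel :=
        if rows.all (fun r => r.getD 0 0 == (rows.headD []).getD 0 0) then
          (PySem.List.min? rows (fun r => r.getD 1 0)).getD []
        else
          (PySem.List.max? rows (fun r => r)).getD []
      let rest := (PySem.List.remove? rows sel).getD rows
      let h := sel.getD 0 0
      let d := sel.getD 1 0
      -- max(rows)[0]: element 0 of the lexicographic max row is the max income
      let s := ((PySem.List.max? rest (fun r => r)).getD []).getD 0 0
      let m := if d ≤ 0 then rem else min rem (PySem.Int.floordiv (h - s) d + 1)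
      bLoop fuel (rest ++ [(h - m * d) :: sel.drop 1])
        (total + (m * h - PySem.Int.floordiv (d * m * (m - 1)) 2)) (rem - m)
    else total

def max_income_alt (T : Int) (travel_times : List Int) (city_incomes : List (List Int)) : Int :=
  let rem := T - travel_times.sum
  if rem ≤ 0 then 0
  -- rows = [list(c) for c in ci]: a per-row copy, the identity on values
  else bLoop rem.toNat (city_incomes.map (fun c => c)) 0 rem

-- ===== PRECONDITION & SPEC =====
-- Pre_ excludes the inputs on which Python A raises IndexError (fewer than two
-- cities, or a city row shorter than two entries, while earning days remain);
-- whether A raises on such a thin input depends on the run's dynamics — not a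
-- closed-form shape — so Pre_ keeps the whole shape out; on the thin inputs where
-- A happens to return, B returns the same value (see the cited examples).
def Pre_max_income (T : Int) (travel_times : List Int) (city_incomes : List (List Int)) : Prop :=
  T ≤ travel_times.sum ∨ (2 ≤ city_incomes.length ∧ ∀ r ∈ city_incomes, 2 ≤ r.length)
instance (T : Int) (travel_times : List Int) (city_incomes : List (List Int)) : Decidable (Pre_max_income T travel_times city_incomes) := by unfold Pre_max_income; infer_instance

def pvWitness_max_income : Int × List Int × List (List Int) := (5, [1], [[5, 2], [4, 1]])

def Spec_max_income (T : Int) (travel_times : List Int) (city_incomes : List (List Int)) (out : Int) : Prop := out = max_income_alt T travel_times city_incomes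
instance (T : Int) (travel_times : List Int) (city_incomes : List (List Int)) (out : Int) : Decidable (Spec_max_income T travel_times city_incomes out) := by unfold Spec_max_income; infer_instance

-- ===== CLAIM (what is proved, stated in full; the proofs are below) =====
def Claim_equal_max_income : Prop := ∀ (T : Int) (travel_times : List Int) (city_incomes : List (List Int)), Dom_max_income T travel_times city_incomes → Pre_max_income T travel_times city_incomes → Spec_max_income T travel_times city_incomes (max_income T travel_times city_incomes)

-- ===== LEMMAS AND PROOFS =====

-- the (income, decrement) pair of a row; both programs' values depend only on
-- the multiset of these pairs
def pr (r : List Int) : Int × Int := (pvElt r 0, pvElt r 1)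

-- "all incomes are equal" as a property of the input rows
def Qeq (arr : List (List Int)) : Prop := ∀ x ∈ arr, ∀ y ∈ arr, (pr x).1 = (pr y).1

-- number of days A's inner loop runs from head income h, decrement d, second income s
def innerCount (h d s day : Int) : Int :=
  if day ≤ 0 ∨ h < s then 0
  else if d ≤ 0 then day else min day (PySem.Int.floordiv (h - s) d + 1)

lemma fdiv_two_eq {x b : Int} (h : x = 2 * b) : PySem.Int.floordiv x 2 = b := by
  rw [(PySem.Int.floordiv_eq_iff_of_pos (by omega))]; omega

lemma fdiv_nonneg_of_nonneg {a b : Int} (ha : 0 ≤ a) (hb : 0 < b) :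
    0 ≤ PySem.Int.floordiv a b := by
  rw [PySem.Int.floordiv_eq_ediv_of_pos hb]; exact Int.ediv_nonneg ha (le_of_lt hb)

lemma decLT_eq :
    (fun (a b : List Int) => a.decidableLT b) = (List.instLinearOrder (α := Int)).toDecidableLT := by
  funext a b; exact Subsingleton.elim _ _

lemma sortedRows_pairwise (xs : List (List Int)) :
    (PySem.List.sorted xs (fun r => r) true).Pairwise (fun a b => b ≤ a) := by
  rw [show (PySem.List.sorted xs (fun r : List Int => r) true)
      = @PySem.List.sorted (List Int) (List Int) List.instLinearOrder.toLT
          (List.instLinearOrder (α := Int)).toDecidableLT xs (fun r => r) true from by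
    rw [← decLT_eq]]
  exact PySem.List.sorted_pairwise_rev xs (fun r => r)

lemma max?_rows_isMax {rows : List (List Int)} {m : List Int}
    (h : PySem.List.max? rows (fun r => r) = some m) : ∀ y ∈ rows, y ≤ m := by
  rw [show PySem.List.max? rows (fun r : List Int => r)
      = @PySem.List.max? (List Int) (List Int) List.instLinearOrder.toLT
          (List.instLinearOrder (α := Int)).toDecidableLT rows (fun r => r) from by
    rw [← decLT_eq]] at h
  exact PySem.List.max?_isMax h

lemma le_rows_fst {u v : List Int} (h : v ≤ u) (hu : 2 ≤ u.length) (hv : 2 ≤ v.length) :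
    (pr v).1 ≤ (pr u).1 ∧ ((pr v).1 = (pr u).1 → (pr v).2 ≤ (pr u).2) := by
  match u, v with
  | x :: y :: tu, x' :: y' :: tv =>
    simp only [pr, pvElt, List.getD_cons_zero, List.getD_cons_succ]
    rcases lt_or_eq_of_le h with hlt | heq
    · have hx : List.Lex (· < ·) (x' :: y' :: tv) (x :: y :: tu) := hlt
      cases hx with
      | rel h1 => exact ⟨le_of_lt h1, fun he => by omega⟩
      | cons h2 =>
        cases h2 with
        | rel h3 => exact ⟨le_refl _, fun _ => le_of_lt h3⟩
        | cons h4 => exact ⟨le_refl _, fun _ => le_refl _⟩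
    · cases heq; exact ⟨le_refl _, fun _ => le_refl _⟩

lemma flag_iff (l : List (List Int)) :
    (l.foldl (fun b r => if pvElt (pvRow l 0) 0 ≠ pvElt r 0 then false else b) true) = true ↔
      ∀ r ∈ l, pvElt r 0 = pvElt (pvRow l 0) 0 := by
  have hfun : (fun (b : Bool) (r : List Int) => if pvElt (pvRow l 0) 0 ≠ pvElt r 0 then false else b)
      = (fun b r => if (fun r => decide (pvElt (pvRow l 0) 0 ≠ pvElt r 0)) r = true then false else b) := by
    funext b r; by_cases h : pvElt (pvRow l 0) 0 ≠ pvElt r 0 <;> simp [h]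
  rw [hfun, PySem.List.foldl_if_false_eq]
  simp only [Bool.true_and, Bool.not_eq_true', List.any_eq_false]
  constructor
  · intro h r hr; have := h r hr; simp at this; omega
  · intro h r hr; have := h r hr; simp; omega

lemma sort_arr_spec (arr : List (List Int)) (h2 : 2 ≤ arr.length)
    (hlen : ∀ r ∈ arr, 2 ≤ r.length) :
    ∃ r0 r1 rest, sort_arr arr = r0 :: r1 :: rest ∧
      (sort_arr arr).Perm arr ∧
      (sort_arr arr).Pairwise (fun a b => (pr b).1 ≤ (pr a).1) ∧
      (Qeq arr → ∀ r ∈ sort_arr arr, (pr r0).2 ≤ (pr r).2) ∧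
      (¬ Qeq arr → ∀ r ∈ sort_arr arr,
        (pr r).1 < (pr r0).1 ∨ ((pr r).1 = (pr r0).1 ∧ (pr r).2 ≤ (pr r0).2)) := by
  have perm1 := PySem.List.sorted_perm arr (fun r => r) true
  set a1 := PySem.List.sorted arr (fun r => r) true with ha1
  have pw1 := sortedRows_pairwise arr
  rw [← ha1] at pw1
  have hlen1 : ∀ r ∈ a1, 2 ≤ r.length := fun r hr => hlen r (perm1.mem_iff.mp hr)
  have hne1 : a1 ≠ [] := by
    intro h; have hl := perm1.length_eq; rw [h] at hl; simp at hl; omega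
  have hhead : pvRow a1 0 ∈ a1 := by
    obtain ⟨x, t, hxt⟩ := List.exists_cons_of_ne_nil hne1
    rw [hxt]; simp [pvRow]
  have hQiff : (∀ r ∈ a1, pvElt r 0 = pvElt (pvRow a1 0) 0) ↔ Qeq arr := by
    constructor
    · intro hall x hx y hy
      have hx1 := hall x (perm1.mem_iff.mpr hx)
      have hy1 := hall y (perm1.mem_iff.mpr hy)
      simp only [pr]; omega
    · intro hq r hr
      exact hq r (perm1.mem_iff.mp hr) (pvRow a1 0) (perm1.mem_iff.mp hhead)
  have pwInc1 : a1.Pairwise (fun a b => (pr b).1 ≤ (pr a).1) :=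
    pw1.imp_of_mem (fun {a b} ha hb hr => (le_rows_fst hr (hlen1 a ha) (hlen1 b hb)).1)
  by_cases hQ : Qeq arr
  · have hflag := (flag_iff a1).mpr (hQiff.mpr hQ)
    have hsa : sort_arr arr = PySem.List.sorted a1 (fun r => pvElt r 1) false := by
      simp only [sort_arr]
      rw [← ha1, hflag]
      simp
    have perm2 := PySem.List.sorted_perm a1 (fun r => pvElt r 1) false
    have permsa : (sort_arr arr).Perm arr := by rw [hsa]; exact perm2.trans perm1
    have pwdec : (PySem.List.sorted a1 (fun r => pvElt r 1) false).Pairwise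
        (fun a b => pvElt a 1 ≤ pvElt b 1) := PySem.List.sorted_pairwise a1 _
    have hlensa : 2 ≤ (sort_arr arr).length := by rw [permsa.length_eq]; exact h2
    obtain ⟨r0, r1, rest, hshape⟩ : ∃ r0 r1 rest, sort_arr arr = r0 :: r1 :: rest := by
      match hsa' : sort_arr arr, hlensa with
      | r0 :: r1 :: rest, _ => exact ⟨r0, r1, rest, rfl⟩
    refine ⟨r0, r1, rest, hshape, permsa, ?_, ?_, fun hc => absurd hQ hc⟩
    · apply List.pairwise_of_forall_mem_list
      intro a ha b hb
      have := hQ a (permsa.mem_iff.mp ha) b (permsa.mem_iff.mp hb)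
      omega
    · intro _ r hr
      rw [hshape] at hr
      have pwdec' : (r0 :: r1 :: rest).Pairwise (fun a b => pvElt a 1 ≤ pvElt b 1) := by
        rw [← hshape, hsa]; exact pwdec
      rcases List.mem_cons.mp hr with rfl | hr'
      · exact le_refl _
      · exact (List.pairwise_cons.mp pwdec').1 r hr'
  · have hflag : (a1.foldl (fun b r => if pvElt (pvRow a1 0) 0 ≠ pvElt r 0 then false else b) true) = false := by
      rcases hfe : (a1.foldl (fun b r => if pvElt (pvRow a1 0) 0 ≠ pvElt r 0 then false else b) true) with _ | _
      · rfl
      · exact absurd (hQiff.mp ((flag_iff a1).mp hfe)) hQ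
    have hsa : sort_arr arr = a1 := by
      simp only [sort_arr]
      rw [← ha1, hflag]
      simp
    have hlensa : 2 ≤ (sort_arr arr).length := by
      rw [(hsa ▸ perm1 : (sort_arr arr).Perm arr).length_eq]; exact h2
    obtain ⟨r0, r1, rest, hshape⟩ : ∃ r0 r1 rest, sort_arr arr = r0 :: r1 :: rest := by
      match hsa' : sort_arr arr, hlensa with
      | r0 :: r1 :: rest, _ => exact ⟨r0, r1, rest, rfl⟩
    refine ⟨r0, r1, rest, hshape, hsa ▸ perm1, hsa ▸ pwInc1, fun hq => absurd hq hQ, ?_⟩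
    intro _ r hr
    have pw1' : (r0 :: r1 :: rest).Pairwise (fun a b => b ≤ a) := by rw [← hshape, hsa]; exact pw1
    rw [hshape] at hr
    rcases List.mem_cons.mp hr with rfl | hr'
    · right; exact ⟨rfl, le_refl _⟩
    · have hle : r ≤ r0 := (List.pairwise_cons.mp pw1').1 r hr'
      have hmem0 : r0 ∈ sort_arr arr := by rw [hshape]; simp
      have hmemr : r ∈ sort_arr arr := by rw [hshape]; exact hr
      have h0 := hlen r0 ((hsa ▸ perm1 : (sort_arr arr).Perm arr).mem_iff.mp hmem0)
      have hres := le_rows_fst hle h0 (hlen r ((hsa ▸ perm1 : (sort_arr arr).Perm arr).mem_iff.mp hmemr))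
      rcases lt_or_eq_of_le hres.1 with h | h
      · exact Or.inl h
      · exact Or.inr ⟨h, hres.2 h⟩

lemma count_step (h d s day : Int) (hday : 0 < day) (hs : s ≤ h) :
    innerCount h d s day = innerCount (h - d) d s (day - 1) + 1 := by
  unfold innerCount
  by_cases hd : d ≤ 0
  · have : ¬ (h - d < s) := by omega
    split_ifs <;> omega
  · push Not at hd
    have hq := (PySem.Int.floordiv_eq_iff_of_pos (b := d) hd
      (a := h - s) (q := PySem.Int.floordiv (h - s) d)).mp rfl
    by_cases hstep : h - d < s
    · have hq0 : PySem.Int.floordiv (h - s) d = 0 := by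
        rw [PySem.Int.floordiv_eq_iff_of_pos hd]
        constructor <;> nlinarith
      rw [hq0]
      split_ifs <;> omega
    · push Not at hstep
      set q := PySem.Int.floordiv (h - s) d with hqdef
      have hq1 : 1 ≤ q := by nlinarith [hq.1, hq.2]
      have hq2 : PySem.Int.floordiv (h - d - s) d = q - 1 := by
        rw [PySem.Int.floordiv_eq_iff_of_pos hd]
        constructor <;> nlinarith [hq.1, hq.2]
      rw [hq2]
      split_ifs <;> omega

lemma innerCount_pos (h d s day : Int) (hday : 0 < day) (hs : s ≤ h) :
    1 ≤ innerCount h d s day := by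
  unfold innerCount
  have : 0 ≤ PySem.Int.floordiv (h - s) d ∨ d ≤ 0 := by
    by_cases hd : d ≤ 0
    · exact Or.inr hd
    · exact Or.inl (fdiv_nonneg_of_nonneg (by omega) (by omega))
  split_ifs <;> omega

lemma series_step (h d m inc : Int) :
    inc + h + (m * (h - d) - PySem.Int.floordiv (d * m * (m - 1)) 2) =
      inc + ((m + 1) * h - PySem.Int.floordiv (d * (m + 1) * m) 2) := by
  obtain ⟨k, hk⟩ := Int.even_mul_succ_self (m - 1)
  obtain ⟨k', hk'⟩ := Int.even_mul_succ_self m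
  have e1 : PySem.Int.floordiv (d * m * (m - 1)) 2 = d * k := by
    apply fdiv_two_eq; linear_combination d * hk
  have e2 : PySem.Int.floordiv (d * (m + 1) * m) 2 = d * k' := by
    apply fdiv_two_eq; linear_combination d * hk'
  have hkk : k' = k + m := by
    have e3 : m * (m + 1) - (m - 1) * (m - 1 + 1) = 2 * m := by ring
    linarith [hk, hk']
  rw [e1, e2, hkk]; ring

lemma aInner_eq (s d : Int) (r1 : List Int) (rest : List (List Int)) (hs : pvElt r1 0 = s) :
    ∀ (n : Nat) (day : Int), day ≤ (n : Int) → ∀ (h inc : Int) (t0 : List Int),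
      aInner ((h :: d :: t0) :: r1 :: rest) inc day =
        (((h - innerCount h d s day * d) :: d :: t0) :: r1 :: rest,
         inc + (innerCount h d s day * h -
           PySem.Int.floordiv (d * innerCount h d s day * (innerCount h d s day - 1)) 2),
         day - innerCount h d s day) := by
  have hs' : r1[0]?.getD 0 = s := by simpa [pvElt] using hs
  intro n
  induction n with
  | zero =>
    intro day hday h inc t0
    rw [aInner]
    have hc0 : innerCount h d s day = 0 := by unfold innerCount; split_ifs <;> omega
    rw [dif_neg (by simp [pvRow, pvElt, hs']; omega)]
    rw [hc0]
    simp
  | succ n ih =>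
    intro day hday h inc t0
    rw [aInner]
    by_cases hcond : s ≤ h ∧ 0 < day
    · rw [dif_pos (by simp [pvRow, pvElt, hs']; omega)]
      simp only [pvRow, pvElt, List.getD_cons_zero, List.getD_cons_succ, List.set]
      have hrec := ih (day - 1) (by omega) (h - d) (inc + h) t0
      simp only at hrec
      rw [hrec]
      have hstep := count_step h d s day hcond.2 hcond.1
      set m' := innerCount (h - d) d s (day - 1) with hm'
      rw [hstep]
      refine congrArg₂ _ ?_ (congrArg₂ _ ?_ ?_)
      · congr 2; ring
      · rw [show m' + 1 - 1 = m' from by ring]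
        exact series_step h d m' inc
      · omega
    · rw [dif_neg (by simp [pvRow, pvElt, hs']; omega)]
      have hc0 : innerCount h d s day = 0 := by unfold innerCount; split_ifs <;> omega
      rw [hc0]
      simp

lemma main_loop : ∀ (fuel : Nat) (arr : List (List Int)) (rows : List (List Int)) (inc day : Int),
    2 ≤ arr.length → (∀ r ∈ arr, 2 ≤ r.length) → (∀ r ∈ rows, 2 ≤ r.length) →
    ((arr.map pr).Perm (rows.map pr)) → day ≤ (fuel : Int) →
    aOuter fuel (sort_arr arr) inc day = bLoop fuel rows inc day := by
  intro fuel
  induction fuel with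
  | zero => intro arr rows inc day _ _ _ _ _; rfl
  | succ fuel ih =>
    intro arr rows inc day h2 hlen hBlen hperm hday
    by_cases hpos : 0 < day
    case neg =>
      simp only [aOuter, bLoop]
      rw [if_neg hpos, if_neg hpos]
    case pos =>
    obtain ⟨r0, r1, rest, hshape, permsa, pwInc, hQmin, hQmax⟩ := sort_arr_spec arr h2 hlen
    have hlensa : ∀ r ∈ sort_arr arr, 2 ≤ r.length := fun r hr => hlen r (permsa.mem_iff.mp hr)
    have h0mem : r0 ∈ sort_arr arr := by rw [hshape]; simp
    have h1mem : r1 ∈ sort_arr arr := by rw [hshape]; simp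
    obtain ⟨hh, dd, t0, h0eq⟩ : ∃ hh dd t0, r0 = hh :: dd :: t0 := by
      have hl0 := hlensa r0 h0mem
      match r0, hl0 with
      | a :: b :: t, _ => exact ⟨a, b, t, rfl⟩
    have hpr0 : pr r0 = (hh, dd) := by rw [h0eq]; rfl
    -- the pr-multiset correspondence between A's sorted list and B's rows
    have hpermS : ((sort_arr arr).map pr).Perm (rows.map pr) := (permsa.map pr).trans hperm
    have hperm2 : (pr r0 :: (r1 :: rest).map pr).Perm (rows.map pr) := by
      have hp := hpermS; rw [hshape] at hp; simpa using hp
    have hrowsarr : ∀ z ∈ rows, ∃ x ∈ sort_arr arr, pr x = pr z := by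
      intro z hz
      have hz2 : pr z ∈ (sort_arr arr).map pr := hpermS.mem_iff.mpr (List.mem_map_of_mem hz)
      obtain ⟨x, hx, hxe⟩ := List.mem_map.mp hz2
      exact ⟨x, hx, hxe⟩
    have harrrows : ∀ x ∈ sort_arr arr, ∃ z ∈ rows, pr z = pr x := by
      intro x hx
      have hx2 : pr x ∈ rows.map pr := hpermS.mem_iff.mp (List.mem_map_of_mem hx)
      obtain ⟨z, hz, hze⟩ := List.mem_map.mp hx2
      exact ⟨z, hz, hze⟩
    have hrowslen : rows.length = arr.length := by
      have := hperm.length_eq; simp at this; omega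
    have hrowsne : rows ≠ [] := by
      intro hnil; rw [hnil] at hrowslen; simp at hrowslen; omega
    set s := pvElt r1 0 with hsdef
    have hpr1s : (pr r1).1 = s := rfl
    have hsle : s ≤ hh := by
      have hb := (List.pairwise_cons.mp (hshape ▸ pwInc)).1 r1 List.mem_cons_self
      rw [hpr0] at hb
      omega
    -- the Bool branch condition of B is exactly Qeq arr
    have hcondiff : (rows.all (fun r => r.getD 0 0 == (rows.headD []).getD 0 0) = true) ↔ Qeq arr := by
      have hheadmem : rows.headD [] ∈ rows := by
        obtain ⟨w, t, hwt⟩ := List.exists_cons_of_ne_nil hrowsne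
        rw [hwt]; simp
      constructor
      · intro hall x hx y hy
        obtain ⟨zx, hzx, hzxe⟩ := harrrows x (permsa.mem_iff.mpr hx)
        obtain ⟨zy, hzy, hzye⟩ := harrrows y (permsa.mem_iff.mpr hy)
        rw [List.all_eq_true] at hall
        have h1 := hall _ hzx
        have h2 := hall _ hzy
        rw [beq_iff_eq] at h1 h2
        have e1 : (pr x).1 = zx.getD 0 0 := by rw [← hzxe]; rfl
        have e2 : (pr y).1 = zy.getD 0 0 := by rw [← hzye]; rfl
        omega
      · intro hq
        rw [List.all_eq_true]
        intro z hz
        rw [beq_iff_eq]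
        obtain ⟨xz, hxz, hxze⟩ := hrowsarr z hz
        obtain ⟨xw, hxw, hxwe⟩ := hrowsarr _ hheadmem
        have := hq xz (permsa.mem_iff.mp hxz) xw (permsa.mem_iff.mp hxw)
        have f1 : (pr xz).1 = z.getD 0 0 := by rw [hxze]; rfl
        have f2 : (pr xw).1 = (rows.headD []).getD 0 0 := by rw [hxwe]; rfl
        omega
    -- B's selected row has A's sorted head's (income, decrement) pair
    obtain ⟨sel, hselif, hselmem, hselpr⟩ :
        ∃ sel, (if rows.all (fun r => r.getD 0 0 == (rows.headD []).getD 0 0) then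
            (PySem.List.min? rows (fun r => r.getD 1 0)).getD []
          else
            (PySem.List.max? rows (fun r => r)).getD []) = sel ∧ sel ∈ rows ∧ pr sel = (hh, dd) := by
      have hr0rows : ∃ z ∈ rows, pr z = (hh, dd) := by
        obtain ⟨z, hz, hze⟩ := harrrows r0 h0mem
        exact ⟨z, hz, by rw [hze, hpr0]⟩
      obtain ⟨z0, hz0, hz0e⟩ := hr0rows
      by_cases hQ : Qeq arr
      · rw [if_pos (hcondiff.mpr hQ)]
        rcases hmn : PySem.List.min? rows (fun r => r.getD 1 0) with _ | mn
        · exact absurd ((PySem.List.min?_eq_none_iff rows _).mp hmn) hrowsne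
        · have hmnmem := PySem.List.min?_mem hmn
          obtain ⟨x, hx, hxe⟩ := hrowsarr mn hmnmem
          have hfst : (pr mn).1 = hh := by
            have := hQ x (permsa.mem_iff.mp hx) r0 (permsa.mem_iff.mp h0mem)
            rw [hxe, hpr0] at this
            exact this
          have hle1 : mn.getD 1 0 ≤ z0.getD 1 0 := PySem.List.min?_isMin hmn z0 hz0
          have hle2 : dd ≤ (pr mn).2 := by
            have := hQmin hQ x hx
            rw [hxe, hpr0] at this
            exact this
          refine ⟨mn, Option.getD_some, hmnmem, ?_⟩
          have e1 : (pr mn).2 = mn.getD 1 0 := rfl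
          have e2 : (pr z0).2 = z0.getD 1 0 := rfl
          have e3 : (pr z0).2 = dd := by rw [hz0e]
          have : pr mn = ((pr mn).1, (pr mn).2) := rfl
          rw [this, hfst]
          have : (pr mn).2 = dd := by omega
          rw [this]
      · rw [if_neg (fun hc => absurd (hcondiff.mp hc) hQ)]
        rcases hmx : PySem.List.max? rows (fun r => r) with _ | mx
        · exact absurd ((PySem.List.max?_eq_none_iff rows _).mp hmx) hrowsne
        · have hmxmem := PySem.List.max?_mem hmx
          have hmax := max?_rows_isMax hmx
          obtain ⟨x, hx, hxe⟩ := hrowsarr mx hmxmem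
          have hb2 := hQmax hQ x hx
          rw [hxe, hpr0] at hb2
          have hb1 := le_rows_fst (hmax z0 hz0) (hBlen mx hmxmem) (hBlen z0 hz0)
          rw [hz0e] at hb1
          refine ⟨mx, Option.getD_some, hmxmem, ?_⟩
          have : pr mx = ((pr mx).1, (pr mx).2) := rfl
          rw [this]
          have h1 : (pr mx).1 = hh := by omega
      -- second component
          have h2 : (pr mx).2 = dd := by
            have := hb1.2
            omega
          rw [h1, h2]
    obtain ⟨sh, sd, st, hselshape⟩ : ∃ sh sd st, sel = sh :: sd :: st := by
      have hl := hBlen sel hselmem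
      match sel, hl with
      | a :: b :: t, _ => exact ⟨a, b, t, rfl⟩
    have hselh : sel.getD 0 0 = hh := by
      have : (pr sel).1 = hh := by rw [hselpr]
      exact this
    have hseld : sel.getD 1 0 = dd := by
      have : (pr sel).2 = dd := by rw [hselpr]
      exact this
    have hrest : (PySem.List.remove? rows sel).getD rows = rows.erase sel := by
      rw [PySem.List.remove?_eq_some_erase rows sel hselmem]; rfl
    have hpermtail : ((r1 :: rest).map pr).Perm ((rows.erase sel).map pr) := by
      have hp1 : (rows.map pr).Perm (pr sel :: (rows.erase sel).map pr) := by
        have := (List.perm_cons_erase hselmem).map pr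
        simpa using this
      have := hperm2.trans hp1
      rw [hselpr, ← hpr0] at this
      exact this.cons_inv
    -- the second income of A's sorted list is B's max of the remaining incomes
    have htailne : rows.erase sel ≠ [] := by
      intro hnil
      have := hpermtail.length_eq
      rw [hnil] at this
      simp at this
    have hs_eq : (((PySem.List.max? (rows.erase sel) (fun r => r)).getD []).getD 0 0 : Int) = s := by
      rcases hmx : PySem.List.max? (rows.erase sel) (fun r => r) with _ | mxr
      · exact absurd ((PySem.List.max?_eq_none_iff _ _).mp hmx) htailne
      · have hmxmem := PySem.List.max?_mem hmx
        have hmax := max?_rows_isMax hmx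
        have hup : (pr mxr).1 ≤ s := by
          have hz2 : pr mxr ∈ (r1 :: rest).map pr :=
            hpermtail.mem_iff.mpr (List.mem_map_of_mem hmxmem)
          obtain ⟨w, hw, hwe⟩ := List.mem_map.mp hz2
          have pwtail : (r1 :: rest).Pairwise (fun a b => (pr b).1 ≤ (pr a).1) :=
            (List.pairwise_cons.mp (hshape ▸ pwInc)).2
          have hwle : (pr w).1 ≤ s := by
            rcases List.mem_cons.mp hw with rfl | hw'
            · omega
            · have := (List.pairwise_cons.mp pwtail).1 w hw'
              omega
          have f1 : (pr w).1 = (pr mxr).1 := by rw [hwe]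
          omega
        have hlo : s ≤ (pr mxr).1 := by
          have hsmem : pr r1 ∈ (rows.erase sel).map pr := hpermtail.mem_iff.mp (by simp)
          obtain ⟨y, hy, hye⟩ := List.mem_map.mp hsmem
          have hyle := le_rows_fst (hmax y hy)
            (hBlen mxr (List.mem_of_mem_erase hmxmem)) (hBlen y (List.mem_of_mem_erase hy))
          have e2 : (pr y).1 = s := by rw [hye]; exact hpr1s
          omega
        simp only [Option.getD_some]
        have e1 : (pr mxr).1 = mxr.getD 0 0 := rfl
        omega
    set mA := innerCount hh dd s day with hmA
    have hm_eq : (if dd ≤ 0 then day else min day (PySem.Int.floordiv (hh - s) dd + 1)) = mA := by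
      rw [hmA]
      unfold innerCount
      rw [if_neg (by omega : ¬ (day ≤ 0 ∨ hh < s))]
    have hmA1 : 1 ≤ mA := innerCount_pos hh dd s day hpos hsle
    -- unfold one round of A
    have hA : aOuter (fuel + 1) (sort_arr arr) inc day
        = aOuter fuel (sort_arr (((hh - mA * dd) :: dd :: t0) :: r1 :: rest))
            (inc + (mA * hh - PySem.Int.floordiv (dd * mA * (mA - 1)) 2)) (day - mA) := by
      simp only [aOuter]
      rw [if_pos hpos, hshape, h0eq]
      rw [aInner_eq s dd r1 rest rfl day.toNat day (by omega) hh inc t0]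
    -- unfold one round of B
    have hB : bLoop (fuel + 1) rows inc day
        = bLoop fuel (rows.erase sel ++ [(hh - mA * dd) :: sel.drop 1])
            (inc + (mA * hh - PySem.Int.floordiv (dd * mA * (mA - 1)) 2)) (day - mA) := by
      simp only [bLoop]
      rw [if_pos hpos, hselif, hrest, hselh, hseld, hs_eq, hm_eq]
    rw [hA, hB]
    apply ih
    · simp
    · intro r hr
      rcases List.mem_cons.mp hr with rfl | hr'
      · simp
      · have : r ∈ sort_arr arr := by rw [hshape]; exact List.mem_cons_of_mem _ hr'
        exact hlensa r this
    · intro r hr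
      rcases List.mem_append.mp hr with hr' | hr'
      · exact hBlen r (List.mem_of_mem_erase hr')
      · rw [List.mem_singleton.mp hr', hselshape]
        simp
    · have hht : ((((hh - mA * dd) :: dd :: t0) :: r1 :: rest).map pr)
          = (hh - mA * dd, dd) :: (r1 :: rest).map pr := by simp [pr, pvElt]
      have hnewpr : pr ((hh - mA * dd) :: sel.tail) = (hh - mA * dd, dd) := by
        rw [hselshape]
        have : sd = dd := by
          rw [hselshape] at hseld
          simpa using hseld
        simp [pr, pvElt, this]
      have hgoal : ((rows.erase sel ++ [(hh - mA * dd) :: sel.drop 1]).map pr)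
          = (rows.erase sel).map pr ++ [(hh - mA * dd, dd)] := by
        simp only [List.map_append, List.map_cons, List.map_nil, List.drop_one, hnewpr]
      rw [hht, hgoal]
      exact (hpermtail.cons _).trans (List.perm_append_singleton _ _).symm
    · push_cast at hday ⊢
      omega

-- ===== VERDICT (by name: the statement is the Claim_ definition above) =====
theorem max_income_spec : Claim_equal_max_income := by
  intro T tt ci _ hpre
  unfold Spec_max_income max_income max_income_alt
  simp only []
  by_cases hT : T ≤ tt.sum
  · rw [if_pos hT, if_pos (by omega)]
  · rw [if_neg hT, if_neg (by omega)]
    rcases hpre with h | ⟨h2, hlen⟩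
    · omega
    · apply main_loop (T - tt.sum).toNat ci (ci.map (fun c => c)) 0 (T - tt.sum) h2 hlen
      · intro r hr
        obtain ⟨c, hc, hce⟩ := List.mem_map.mp hr
        rw [← hce]; exact hlen c hc
      · simp
      · omega
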